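-- pv_equiv track=rewrite | github.com/sidamarnath/DataStructures-Algorithms | CC1/solution.py | farmer_fencing
-- ===== SOURCE A (Python) =====
-- from typing import List, Tuple
--
-- def farmer_fencing(points: List[Tuple[int, int]]) -> int:
--     """
--     Calculates the minimum perimeter required to form a rectangle using the
--     given points.
--     :param points: The fence posts available to use.
--     :return: The minimum perimeter of the fence.
--     """
--
--
--     #! Runtime Complexity -> O(n^2) - Two nested loops
--     #! Spacetime Complexity -> O(n) - points_set set requires space
--     points_set = set(points)
--     minimum_perimeter = float('inf')
--
--     #? Base case
--     if len(points) < 4: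
--         return 0
--
--     for i in range(len(points)):
--         x1, y1 = points[i][0], points[i][1]
--         for j in range(i + 1, len(points)):
--             x2, y2 = points[j][0], points[j][1]
--             if x1 != x2 and y1 != y2:
--                 if (x1, y2) in points_set and (x2, y1) in points_set:
--                     perimeter = (2 * abs(y2 - y1)) + (2 * abs(x2 - x1))
--                     minimum_perimeter = min(perimeter, minimum_perimeter)
--
--     return minimum_perimeter if minimum_perimeter != float('inf') else 0
-- ===== SOURCE B (Python) =====
-- from typing import List, Tuple
--
-- def farmer_fencing(points: List[Tuple[int, int]]) -> int:
--     """
--     Minimum perimeter of an axis-aligned rectangle whose four corners are all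
--     among the given points (0 if none, or fewer than 4 posts are given).
--
--     Alternative algorithm: group the points into columns (x -> distinct ys),
--     then for each ordered pair of columns x1 < x2 take the common ys and
--     minimise 2*(yb - ya) + 2*(x2 - x1) over ya < yb in the intersection.
--     """
--     if len(points) < 4:
--         return 0
--     cols = {}
--     for x, y in points:
--         ys = cols.setdefault(x, [])
--         if y not in ys:
--             ys.append(y)
--     best = None
--     for x1, ys1 in cols.items():
--         for x2, ys2 in cols.items():
--             if x1 < x2:
--                 dx = x2 - x1
--                 common = [y for y in ys1 if y in ys2]
--                 for ya in common:
--                     for yb in common: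
--                         if ya < yb:
--                             per = 2 * (yb - ya) + 2 * dx
--                             if best is None or per < best:
--                                 best = per
--     return best if best is not None else 0
-- ===== Notes on version B (the rewrite author's own statement) =====
-- stated objective: alternative
-- what changed: Replaces the scan over all index pairs with corner membership tests in a point set by a column index: points are grouped into a dict x -> distinct ys, and the minimum 2*(yb-ya)+2*(x2-x1) is taken over ordered column pairs x1<x2 and ordered pairs ya<yb of their common ys.
import Mathlib
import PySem

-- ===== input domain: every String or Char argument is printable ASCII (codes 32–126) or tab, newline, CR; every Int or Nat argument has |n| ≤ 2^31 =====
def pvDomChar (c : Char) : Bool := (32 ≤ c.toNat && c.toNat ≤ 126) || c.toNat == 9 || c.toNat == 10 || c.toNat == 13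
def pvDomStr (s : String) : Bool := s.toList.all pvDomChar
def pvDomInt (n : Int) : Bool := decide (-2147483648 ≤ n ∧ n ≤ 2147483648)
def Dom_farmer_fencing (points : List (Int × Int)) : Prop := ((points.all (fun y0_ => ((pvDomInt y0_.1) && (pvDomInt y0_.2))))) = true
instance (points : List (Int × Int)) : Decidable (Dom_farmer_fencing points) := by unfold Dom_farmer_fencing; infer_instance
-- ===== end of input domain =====

-- B replaces A's scan over all index pairs (with corner membership tests in a point set)
-- by a column index x -> distinct ys, minimising over ordered column pairs and ordered
-- common-y pairs; same return value, no side effects (alternative decomposition, not faster).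

-- ===== PORT A =====
-- Literal port of A. `for i in range(len(points))` + `points[i]` is rendered as a fold over
-- `points.zipIdx` (same iterations, same element values); `for j in range(i+1, len(points))`
-- + `points[j]` as a fold over `points.drop (i+1)`; the float('inf') accumulator is
-- `none : Option Int` (Python's `min(perimeter, acc)` on ints is `min` once acc is set).
def farmer_fencing (points : List (Int × Int)) : Int :=
  let points_set := PySem.Set.ofList points
  if points.length < 4 then 0
  else
    let m : Option Int := points.zipIdx.foldl (fun acc pi =>
      let x1 := pi.1.1
      let y1 := pi.1.2
      (points.drop (pi.2 + 1)).foldl (fun acc2 q =>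
        let x2 := q.1
        let y2 := q.2
        if x1 ≠ x2 ∧ y1 ≠ y2 then
          if (x1, y2) ∈ points_set ∧ (x2, y1) ∈ points_set then
            let perimeter := 2 * ((y2 - y1).natAbs : Int) + 2 * ((x2 - x1).natAbs : Int)
            some (match acc2 with | none => perimeter | some mp => min perimeter mp)
          else acc2
        else acc2) acc) none
    match m with
    | none => 0
    | some v => v

-- ===== PORT B =====
-- Port of Source B's column-building loop. `cols.setdefault(x, []).…` with a fresh key inserts
-- x ↦ [] and then appends y (y ∉ [] always), i.e. inserts x ↦ [y] at the end — exactly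
-- `Dict.insert` on a fresh key; on a present key `insert` overwrites in place like the
-- in-place list append.
def ffColumns (points : List (Int × Int)) : PySem.Dict Int (List Int) :=
  points.foldl (fun d p =>
    let ys := d.getD p.1 []
    if p.2 ∈ ys then d else d.insert p.1 (ys ++ [p.2])) PySem.Dict.empty

-- Port of Source B's main function (`best = None` is `none : Option Int`).
def farmer_fencing_alt (points : List (Int × Int)) : Int :=
  if points.length < 4 then 0
  else
    let cols := ffColumns points
    let best : Option Int := cols.items.foldl (fun b1 p1 =>
      cols.items.foldl (fun b2 p2 =>
        if p1.1 < p2.1 then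
          let dx := p2.1 - p1.1
          let common := p1.2.filter (fun y => decide (y ∈ p2.2))
          common.foldl (fun b3 ya =>
            common.foldl (fun b4 yb =>
              if ya < yb then
                let per := 2 * (yb - ya) + 2 * dx
                match b4 with
                | none => some per
                | some m => if per < m then some per else some m
              else b4) b3) b2
        else b2) b1) none
    match best with
    | none => 0
    | some v => v

-- ===== PRECONDITION & SPEC =====
def Spec_farmer_fencing (points : List (Int × Int)) (out : Int) : Prop := out = farmer_fencing_alt points
instance (points : List (Int × Int)) (out : Int) : Decidable (Spec_farmer_fencing points out) := by unfold Spec_farmer_fencing; infer_instance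

-- ===== CLAIM (what is proved, stated in full; the proofs are below) =====
def Claim_equal_farmer_fencing : Prop := ∀ (points : List (Int × Int)), Dom_farmer_fencing points → Spec_farmer_fencing points (farmer_fencing points)

-- ===== LEMMAS AND PROOFS =====

-- The common running-minimum step both loops perform (`none` = not found yet).
def ffStep (acc : Option Int) (v : Int) : Option Int :=
  some (match acc with | none => v | some m => min v m)

-- All ordered pairs (earlier element, later element) of a list.
def ffPairs {α : Type} (l : List α) : List (α × α) :=
  match l with
  | [] => []
  | a :: t => t.map (fun b => (a, b)) ++ ffPairs t

def ffPerA (pq : (Int × Int) × (Int × Int)) : Int :=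
  2 * ((pq.2.2 - pq.1.2).natAbs : Int) + 2 * ((pq.2.1 - pq.1.1).natAbs : Int)

def ffCondA (s : List (Int × Int)) (pq : (Int × Int) × (Int × Int)) : Bool :=
  decide (pq.1.1 ≠ pq.2.1 ∧ pq.1.2 ≠ pq.2.2 ∧ (pq.1.1, pq.2.2) ∈ s ∧ (pq.2.1, pq.1.2) ∈ s)

-- The candidate perimeters each side minimises over.
def ffCandsA (points : List (Int × Int)) : List Int :=
  (ffPairs points).filterMap (fun pq =>
    if ffCondA (PySem.Set.ofList points) pq then some (ffPerA pq) else none)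

def ffCandsB (points : List (Int × Int)) : List Int :=
  (ffColumns points).items.flatMap (fun p1 =>
    (ffColumns points).items.flatMap (fun p2 =>
      if p1.1 < p2.1 then
        (p1.2.filter (fun y => decide (y ∈ p2.2))).flatMap (fun ya =>
          (p1.2.filter (fun y => decide (y ∈ p2.2))).filterMap (fun yb =>
            if ya < yb then some (2 * (yb - ya) + 2 * (p2.1 - p1.1)) else none))
      else []))

-- "v is the perimeter of an axis-aligned rectangle with all four corners among the points".
def ffRect (points : List (Int × Int)) (v : Int) : Prop :=
  ∃ x1 x2 y1 y2 : Int, x1 < x2 ∧ y1 < y2 ∧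
    (x1, y1) ∈ points ∧ (x1, y2) ∈ points ∧ (x2, y1) ∈ points ∧ (x2, y2) ∈ points ∧
    v = 2 * (y2 - y1) + 2 * (x2 - x1)

lemma foldl_ffStep_some : ∀ (l : List Int) (m : Int), l.foldl ffStep (some m) = some (l.foldl min m) := by
  intro l
  induction l with
  | nil => intro m; rfl
  | cons a t ih =>
    intro m
    show t.foldl ffStep (ffStep (some m) a) = some (t.foldl min (min m a))
    have h : ffStep (some m) a = some (min m a) := by
      show some (min a m) = some (min m a)
      rw [min_comm]
    rw [h, ih]

lemma foldl_ffStep_none : ∀ (l : List Int), l.foldl ffStep none = l.min? := by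
  intro l
  cases l with
  | nil => rfl
  | cons a t =>
    show t.foldl ffStep (ffStep none a) = (a :: t).min?
    have h : ffStep none a = some a := rfl
    rw [h, foldl_ffStep_some]
    rfl

lemma ffmin_congr {l1 l2 : List Int} (h : ∀ a, a ∈ l1 ↔ a ∈ l2) : l1.min? = l2.min? := by
  cases h1 : l1.min? with
  | none =>
    rw [List.min?_eq_none_iff] at h1
    subst h1
    cases h2 : l2.min? with
    | none => rfl
    | some a =>
      rw [List.min?_eq_some_iff] at h2
      exact absurd ((h a).mpr h2.1) (List.not_mem_nil)
  | some a =>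
    rw [List.min?_eq_some_iff] at h1
    exact (List.min?_eq_some_iff.mpr
      ⟨(h a).mp h1.1, fun b hb => h1.2 b ((h b).mpr hb)⟩).symm

lemma foldl_fun_congr {α β : Type _} {f g : β → α → β} (h : ∀ b a, f b a = g b a)
    (l : List α) (init : β) : l.foldl f init = l.foldl g init := by
  have hfg : f = g := funext fun b => funext fun a => h b a
  rw [hfg]

lemma foldl_guard_filterMap {γ : Type _} (g : γ → Bool) (v : γ → Int) :
    ∀ (l : List γ) (acc : Option Int),
      l.foldl (fun a x => if g x then ffStep a (v x) else a) acc
        = (l.filterMap fun x => if g x then some (v x) else none).foldl ffStep acc := by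
  intro l
  induction l with
  | nil => intro acc; rfl
  | cons x t ih =>
    intro acc
    cases hg : g x <;> simp [List.foldl_cons, hg, ih]

lemma mem_ffPairs {α : Type} : ∀ {l : List α} {p q : α}, (p, q) ∈ ffPairs l → p ∈ l ∧ q ∈ l := by
  intro l
  induction l with
  | nil => intro p q h; cases h
  | cons a t ih =>
    intro p q h
    rcases List.mem_append.mp h with h' | h'
    · rcases List.mem_map.mp h' with ⟨b, hb, heq⟩
      rw [Prod.mk.injEq] at heq
      obtain ⟨rfl, rfl⟩ := heq
      exact ⟨List.mem_cons_self, List.mem_cons_of_mem _ hb⟩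
    · rcases ih h' with ⟨hp, hq⟩
      exact ⟨List.mem_cons_of_mem _ hp, List.mem_cons_of_mem _ hq⟩

lemma ffPairs_total {α : Type} : ∀ {l : List α} {p q : α}, p ∈ l → q ∈ l → p ≠ q →
    (p, q) ∈ ffPairs l ∨ (q, p) ∈ ffPairs l := by
  intro l
  induction l with
  | nil => intro p q hp; cases hp
  | cons a t ih =>
    intro p q hp hq hne
    rcases List.mem_cons.mp hp with rfl | hp'
    · rcases List.mem_cons.mp hq with rfl | hq'
      · exact absurd rfl hne
      · exact Or.inl (List.mem_append.mpr (Or.inl (List.mem_map.mpr ⟨q, hq', rfl⟩)))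
    · rcases List.mem_cons.mp hq with rfl | hq'
      · exact Or.inr (List.mem_append.mpr (Or.inl (List.mem_map.mpr ⟨p, hp', rfl⟩)))
      · rcases ih hp' hq' hne with h | h
        · exact Or.inl (List.mem_append.mpr (Or.inr h))
        · exact Or.inr (List.mem_append.mpr (Or.inr h))

lemma mem_ffCandsA {points : List (Int × Int)} {v : Int} :
    v ∈ ffCandsA points ↔ ffRect points v := by
  unfold ffCandsA
  rw [List.mem_filterMap]
  constructor
  · rintro ⟨⟨⟨px, py⟩, qx, qy⟩, hmem, hval⟩
    by_cases hc : ffCondA (PySem.Set.ofList points) ((px, py), qx, qy) = true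
    · rw [if_pos hc] at hval
      have hv := Option.some.inj hval
      unfold ffCondA at hc
      rw [decide_eq_true_iff] at hc
      obtain ⟨hne1, hne2, hm1, hm2⟩ := hc
      have hne1' : px ≠ qx := hne1
      have hne2' : py ≠ qy := hne2
      obtain ⟨hp, hq⟩ := mem_ffPairs hmem
      rw [PySem.Set.mem_ofList] at hm1 hm2
      have hv' : 2 * ((qy - py).natAbs : Int) + 2 * ((qx - px).natAbs : Int) = v := hv
      clear hv
      rcases lt_or_gt_of_ne hne1' with hx | hx <;> rcases lt_or_gt_of_ne hne2' with hy | hy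
      · exact ⟨px, qx, py, qy, hx, hy, hp, hm1, hm2, hq, by omega⟩
      · exact ⟨px, qx, qy, py, hx, hy, hm1, hp, hq, hm2, by omega⟩
      · exact ⟨qx, px, py, qy, hx, hy, hm2, hq, hp, hm1, by omega⟩
      · exact ⟨qx, px, qy, py, hx, hy, hq, hm2, hm1, hp, by omega⟩
    · rw [if_neg hc] at hval
      cases hval
  · rintro ⟨x1, x2, y1, y2, hx, hy, h11, h12, h21, h22, rfl⟩
    have hne : ((x1, y1) : Int × Int) ≠ (x2, y2) := by
      intro h
      rw [Prod.mk.injEq] at h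
      omega
    rcases ffPairs_total h11 h22 hne with h | h
    · refine ⟨((x1, y1), (x2, y2)), h, ?_⟩
      have hc : ffCondA (PySem.Set.ofList points) ((x1, y1), (x2, y2)) = true := by
        unfold ffCondA
        rw [decide_eq_true_iff]
        refine ⟨(show x1 ≠ x2 by omega), (show y1 ≠ y2 by omega), ?_, ?_⟩ <;>
          rw [PySem.Set.mem_ofList]
        · exact h12
        · exact h21
      rw [if_pos hc]
      simp only [Option.some.injEq]
      show 2 * ((y2 - y1).natAbs : Int) + 2 * ((x2 - x1).natAbs : Int)
        = 2 * (y2 - y1) + 2 * (x2 - x1)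
      omega
    · refine ⟨((x2, y2), (x1, y1)), h, ?_⟩
      have hc : ffCondA (PySem.Set.ofList points) ((x2, y2), (x1, y1)) = true := by
        unfold ffCondA
        rw [decide_eq_true_iff]
        refine ⟨(show x2 ≠ x1 by omega), (show y2 ≠ y1 by omega), ?_, ?_⟩ <;>
          rw [PySem.Set.mem_ofList]
        · exact h21
        · exact h12
      rw [if_pos hc]
      simp only [Option.some.injEq]
      show 2 * ((y1 - y2).natAbs : Int) + 2 * ((x1 - x2).natAbs : Int)
        = 2 * (y2 - y1) + 2 * (x2 - x1)
      omega

lemma ffColumns_aux : ∀ (l : List (Int × Int)) (d : PySem.Dict Int (List Int)) (x y : Int),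
    (y ∈ (l.foldl (fun d p =>
        let ys := d.getD p.1 []
        if p.2 ∈ ys then d else d.insert p.1 (ys ++ [p.2])) d).getD x [])
      ↔ (y ∈ d.getD x [] ∨ (x, y) ∈ l) := by
  intro l
  induction l with
  | nil => intro d x y; simp
  | cons p t ih =>
    rcases p with ⟨a, b⟩
    intro d x y
    rw [List.foldl_cons, ih]
    show y ∈ (if b ∈ d.getD a [] then d else d.insert a (d.getD a [] ++ [b])).getD x [] ∨ _ ↔ _
    by_cases hp : b ∈ d.getD a []
    · rw [if_pos hp]
      simp only [List.mem_cons, Prod.mk.injEq]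
      constructor
      · rintro (h | h)
        · exact Or.inl h
        · exact Or.inr (Or.inr h)
      · rintro (h | ⟨rfl, rfl⟩ | h)
        · exact Or.inl h
        · exact Or.inl hp
        · exact Or.inr h
    · rw [if_neg hp, PySem.Dict.getD_insert]
      by_cases hx : x = a
      · subst hx
        rw [if_pos rfl]
        simp only [List.mem_append, List.mem_cons, Prod.mk.injEq]
        tauto
      · rw [if_neg hx]
        simp only [List.mem_cons, Prod.mk.injEq]
        tauto

lemma ffColumns_mem {points : List (Int × Int)} {x y : Int} :
    y ∈ (ffColumns points).getD x [] ↔ (x, y) ∈ points := by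
  have h := ffColumns_aux points PySem.Dict.empty x y
  rw [PySem.Dict.getD_empty] at h
  simpa using h

lemma ffColumns_nodup_aux : ∀ (l : List (Int × Int)) (d : PySem.Dict Int (List Int)),
    d.keys.Nodup → (l.foldl (fun d p =>
        let ys := d.getD p.1 []
        if p.2 ∈ ys then d else d.insert p.1 (ys ++ [p.2])) d).keys.Nodup := by
  intro l
  induction l with
  | nil => intro d hd; exact hd
  | cons p t ih =>
    intro d hd
    rw [List.foldl_cons]
    show (t.foldl _ (if p.2 ∈ d.getD p.1 [] then d else d.insert p.1 (d.getD p.1 [] ++ [p.2]))).keys.Nodup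
    by_cases hp : p.2 ∈ d.getD p.1 []
    · rw [if_pos hp]; exact ih d hd
    · rw [if_neg hp]; exact ih _ (PySem.Dict.nodup_keys_insert _ _ _ hd)

lemma ffColumns_nodup {points : List (Int × Int)} : (ffColumns points).keys.Nodup :=
  ffColumns_nodup_aux points PySem.Dict.empty PySem.Dict.nodup_keys_empty

lemma ffColumns_items_getD {points : List (Int × Int)} {x : Int} {ys : List Int}
    (h : (x, ys) ∈ (ffColumns points).items) : (ffColumns points).getD x [] = ys :=
  PySem.Dict.getD_of_mem_items _ h ffColumns_nodup []

lemma ffColumns_key_of_mem {points : List (Int × Int)} {x y : Int} (h : (x, y) ∈ points) :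
    ∃ ys, (x, ys) ∈ (ffColumns points).items ∧ y ∈ ys := by
  have hy : y ∈ (ffColumns points).getD x [] := ffColumns_mem.mpr h
  cases hg : (ffColumns points).get? x with
  | none =>
    rw [PySem.Dict.getD_of_get?_eq_none _ [] hg] at hy
    cases hy
  | some ys =>
    rw [PySem.Dict.getD_of_get?_eq_some _ [] hg] at hy
    exact ⟨ys, PySem.Dict.mem_items_of_get?_eq_some _ hg, hy⟩

lemma mem_ffCandsB {points : List (Int × Int)} {v : Int} :
    v ∈ ffCandsB points ↔ ffRect points v := by
  unfold ffCandsB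
  simp only [List.mem_flatMap]
  constructor
  · rintro ⟨⟨x1, ys1⟩, hp1, ⟨x2, ys2⟩, hp2, hmem⟩
    by_cases hc : x1 < x2
    swap
    · rw [if_neg hc] at hmem
      cases hmem
    rw [if_pos hc] at hmem
    simp only [List.mem_flatMap, List.mem_filterMap, List.mem_filter, decide_eq_true_iff] at hmem
    obtain ⟨ya, ⟨hya1, hya2⟩, yb, ⟨⟨hyb1, hyb2⟩, hval⟩⟩ := hmem
    by_cases hlt : ya < yb
    swap
    · rw [if_neg hlt] at hval
      cases hval
    rw [if_pos hlt] at hval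
    have hv := Option.some.inj hval
    have g1 := ffColumns_items_getD hp1
    have g2 := ffColumns_items_getD hp2
    refine ⟨x1, x2, ya, yb, hc, hlt, ?_, ?_, ?_, ?_, hv.symm⟩
    · exact ffColumns_mem.mp (g1 ▸ hya1)
    · exact ffColumns_mem.mp (g1 ▸ hyb1)
    · exact ffColumns_mem.mp (g2 ▸ hya2)
    · exact ffColumns_mem.mp (g2 ▸ hyb2)
  · rintro ⟨x1, x2, y1, y2, hx, hy, h11, h12, h21, h22, rfl⟩
    obtain ⟨ys1, hi1, -⟩ := ffColumns_key_of_mem h11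
    obtain ⟨ys2, hi2, -⟩ := ffColumns_key_of_mem h21
    have g1 := ffColumns_items_getD hi1
    have g2 := ffColumns_items_getD hi2
    have hy1s1 : y1 ∈ ys1 := g1 ▸ ffColumns_mem.mpr h11
    have hy2s1 : y2 ∈ ys1 := g1 ▸ ffColumns_mem.mpr h12
    have hy1s2 : y1 ∈ ys2 := g2 ▸ ffColumns_mem.mpr h21
    have hy2s2 : y2 ∈ ys2 := g2 ▸ ffColumns_mem.mpr h22
    refine ⟨(x1, ys1), hi1, (x2, ys2), hi2, ?_⟩
    show (2 * (y2 - y1) + 2 * (x2 - x1)) ∈ (if x1 < x2 then _ else ([] : List Int))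
    rw [if_pos hx]
    simp only [List.mem_flatMap, List.mem_filterMap, List.mem_filter, decide_eq_true_iff]
    exact ⟨y1, ⟨hy1s1, hy1s2⟩, y2, ⟨⟨hy2s1, hy2s2⟩, by rw [if_pos hy]⟩⟩

lemma ffA_double (s : List (Int × Int)) :
    ∀ (t points : List (Int × Int)) (k : Nat), points.drop k = t → ∀ (acc : Option Int),
      (t.zipIdx k).foldl (fun acc pi =>
          (points.drop (pi.2 + 1)).foldl (fun acc2 q =>
            if pi.1.1 ≠ q.1 ∧ pi.1.2 ≠ q.2 then
              if (pi.1.1, q.2) ∈ s ∧ (q.1, pi.1.2) ∈ s then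
                ffStep acc2 (ffPerA (pi.1, q))
              else acc2
            else acc2) acc) acc
        = (ffPairs t).foldl (fun a pq =>
            if pq.1.1 ≠ pq.2.1 ∧ pq.1.2 ≠ pq.2.2 then
              if (pq.1.1, pq.2.2) ∈ s ∧ (pq.2.1, pq.1.2) ∈ s then
                ffStep a (ffPerA pq)
              else a
            else a) acc := by
  intro t
  induction t with
  | nil => intro points k h acc; rfl
  | cons p t ih =>
    intro points k h acc
    have hdrop : points.drop (k + 1) = t := by
      have h2 : (points.drop k).tail = t := by rw [h]; rfl
      rwa [List.tail_drop] at h2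
    show (t.zipIdx (k + 1)).foldl _
        ((points.drop (k + 1)).foldl (fun acc2 q =>
          if p.1 ≠ q.1 ∧ p.2 ≠ q.2 then
            if (p.1, q.2) ∈ s ∧ (q.1, p.2) ∈ s then
              ffStep acc2 (ffPerA (p, q))
            else acc2
          else acc2) acc)
      = _
    rw [hdrop, ih points (k + 1) hdrop]
    show _ = ((t.map (fun b => (p, b)) ++ ffPairs t).foldl _ acc)
    rw [List.foldl_append, List.foldl_map]

lemma foldl_guardP_filterMap {γ : Type _} (P : γ → Prop) [DecidablePred P] (v : γ → Int) :
    ∀ (l : List γ) (acc : Option Int),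
      l.foldl (fun a x => if P x then ffStep a (v x) else a) acc
        = (l.filterMap fun x => if P x then some (v x) else none).foldl ffStep acc := by
  intro l
  induction l with
  | nil => intro acc; rfl
  | cons x t ih =>
    intro acc
    by_cases hg : P x <;> simp [List.foldl_cons, hg, ih]

lemma ffA_value (points : List (Int × Int)) :
    farmer_fencing points = if points.length < 4 then 0 else ((ffCandsA points).min?).getD 0 := by
  unfold farmer_fencing
  by_cases h : points.length < 4
  · rw [if_pos h, if_pos h]
  · rw [if_neg h, if_neg h]
    have h1 : points.zipIdx.foldl (fun acc pi =>
          (points.drop (pi.2 + 1)).foldl (fun acc2 q =>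
            if pi.1.1 ≠ q.1 ∧ pi.1.2 ≠ q.2 then
              if (pi.1.1, q.2) ∈ PySem.Set.ofList points ∧ (q.1, pi.1.2) ∈ PySem.Set.ofList points then
                ffStep acc2 (ffPerA (pi.1, q))
              else acc2
            else acc2) acc) none
        = (ffPairs points).foldl (fun a pq =>
            if pq.1.1 ≠ pq.2.1 ∧ pq.1.2 ≠ pq.2.2 then
              if (pq.1.1, pq.2.2) ∈ PySem.Set.ofList points ∧ (pq.2.1, pq.1.2) ∈ PySem.Set.ofList points then
                ffStep a (ffPerA pq)
              else a
            else a) none :=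
      ffA_double (PySem.Set.ofList points) points points 0 rfl none
    have h2 : (ffPairs points).foldl (fun a pq =>
            if pq.1.1 ≠ pq.2.1 ∧ pq.1.2 ≠ pq.2.2 then
              if (pq.1.1, pq.2.2) ∈ PySem.Set.ofList points ∧ (pq.2.1, pq.1.2) ∈ PySem.Set.ofList points then
                ffStep a (ffPerA pq)
              else a
            else a) none
        = (ffPairs points).foldl (fun a pq =>
            if ffCondA (PySem.Set.ofList points) pq then ffStep a (ffPerA pq) else a) none := by
      refine foldl_fun_congr (fun a pq => ?_) _ _
      unfold ffCondA
      by_cases hc : pq.1.1 ≠ pq.2.1 ∧ pq.1.2 ≠ pq.2.2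
      · rw [if_pos hc]
        by_cases hm : (pq.1.1, pq.2.2) ∈ PySem.Set.ofList points ∧ (pq.2.1, pq.1.2) ∈ PySem.Set.ofList points
        · rw [if_pos hm, if_pos (by rw [decide_eq_true_iff]; exact ⟨hc.1, hc.2, hm.1, hm.2⟩)]
        · rw [if_neg hm, if_neg (by simp only [decide_eq_true_iff]; tauto)]
      · rw [if_neg hc, if_neg (by simp only [decide_eq_true_iff]; tauto)]
    have h3 : (ffPairs points).foldl (fun a pq =>
            if ffCondA (PySem.Set.ofList points) pq then ffStep a (ffPerA pq) else a) none
        = (ffCandsA points).min? := by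
      rw [foldl_guard_filterMap (ffCondA (PySem.Set.ofList points)) ffPerA, foldl_ffStep_none]
      rfl
    show (match points.zipIdx.foldl (fun acc pi =>
          (points.drop (pi.2 + 1)).foldl (fun acc2 q =>
            if pi.1.1 ≠ q.1 ∧ pi.1.2 ≠ q.2 then
              if (pi.1.1, q.2) ∈ PySem.Set.ofList points ∧ (q.1, pi.1.2) ∈ PySem.Set.ofList points then
                ffStep acc2 (ffPerA (pi.1, q))
              else acc2
            else acc2) acc) none with
      | none => 0
      | some v => v) = ((ffCandsA points).min?).getD 0
    rw [h1, h2, h3]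
    cases (ffCandsA points).min? <;> rfl

lemma ffUpdB (b : Option Int) (v : Int) :
    (match b with | none => some v | some m => if v < m then some v else some m) = ffStep b v := by
  cases b with
  | none => rfl
  | some m =>
    show (if v < m then some v else some m) = some (min v m)
    by_cases h : v < m
    · rw [if_pos h, min_eq_left h.le]
    · rw [if_neg h, min_eq_right (by omega)]

lemma ffB_value (points : List (Int × Int)) :
    farmer_fencing_alt points = if points.length < 4 then 0 else ((ffCandsB points).min?).getD 0 := by
  unfold farmer_fencing_alt
  by_cases h : points.length < 4
  · rw [if_pos h, if_pos h]
  · rw [if_neg h, if_neg h]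
    have key : (ffColumns points).items.foldl (fun b1 p1 =>
        (ffColumns points).items.foldl (fun b2 p2 =>
          if p1.1 < p2.1 then
            (p1.2.filter (fun y => decide (y ∈ p2.2))).foldl (fun b3 ya =>
              (p1.2.filter (fun y => decide (y ∈ p2.2))).foldl (fun b4 yb =>
                if ya < yb then
                  ffStep b4 (2 * (yb - ya) + 2 * (p2.1 - p1.1))
                else b4) b3) b2
          else b2) b1) none
        = (ffCandsB points).foldl ffStep none := by
      unfold ffCandsB
      rw [List.foldl_flatMap]
      refine foldl_fun_congr (fun b1 p1 => ?_) _ _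
      rw [List.foldl_flatMap]
      refine foldl_fun_congr (fun b2 p2 => ?_) _ _
      by_cases hc : p1.1 < p2.1
      · rw [if_pos hc, if_pos hc, List.foldl_flatMap]
        refine foldl_fun_congr (fun b3 ya => ?_) _ _
        exact foldl_guardP_filterMap (fun yb => ya < yb) _ _ _
      · rw [if_neg hc, if_neg hc]
        rfl
    have pre : (ffColumns points).items.foldl (fun b1 p1 =>
        (ffColumns points).items.foldl (fun b2 p2 =>
          if p1.1 < p2.1 then
            (p1.2.filter (fun y => decide (y ∈ p2.2))).foldl (fun b3 ya =>
              (p1.2.filter (fun y => decide (y ∈ p2.2))).foldl (fun b4 yb =>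
                if ya < yb then
                  (match b4 with
                   | none => some (2 * (yb - ya) + 2 * (p2.1 - p1.1))
                   | some m => if 2 * (yb - ya) + 2 * (p2.1 - p1.1) < m then
                       some (2 * (yb - ya) + 2 * (p2.1 - p1.1)) else some m)
                else b4) b3) b2
          else b2) b1) none
        = (ffColumns points).items.foldl (fun b1 p1 =>
        (ffColumns points).items.foldl (fun b2 p2 =>
          if p1.1 < p2.1 then
            (p1.2.filter (fun y => decide (y ∈ p2.2))).foldl (fun b3 ya =>
              (p1.2.filter (fun y => decide (y ∈ p2.2))).foldl (fun b4 yb =>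
                if ya < yb then
                  ffStep b4 (2 * (yb - ya) + 2 * (p2.1 - p1.1))
                else b4) b3) b2
          else b2) b1) none := by
      refine foldl_fun_congr (fun b1 p1 => ?_) _ _
      refine foldl_fun_congr (fun b2 p2 => ?_) _ _
      by_cases hc : p1.1 < p2.1
      · rw [if_pos hc, if_pos hc]
        refine foldl_fun_congr (fun b3 ya => ?_) _ _
        refine foldl_fun_congr (fun b4 yb => ?_) _ _
        by_cases hlt : ya < yb
        · rw [if_pos hlt, if_pos hlt, ffUpdB]
        · rw [if_neg hlt, if_neg hlt]
      · rw [if_neg hc, if_neg hc]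
    show (match (ffColumns points).items.foldl (fun b1 p1 =>
        (ffColumns points).items.foldl (fun b2 p2 =>
          if p1.1 < p2.1 then
            (p1.2.filter (fun y => decide (y ∈ p2.2))).foldl (fun b3 ya =>
              (p1.2.filter (fun y => decide (y ∈ p2.2))).foldl (fun b4 yb =>
                if ya < yb then
                  (match b4 with
                   | none => some (2 * (yb - ya) + 2 * (p2.1 - p1.1))
                   | some m => if 2 * (yb - ya) + 2 * (p2.1 - p1.1) < m then
                       some (2 * (yb - ya) + 2 * (p2.1 - p1.1)) else some m)
                else b4) b3) b2
          else b2) b1) none with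
      | none => 0
      | some v => v) = ((ffCandsB points).min?).getD 0
    rw [pre, key, foldl_ffStep_none]
    cases (ffCandsB points).min? <;> rfl

-- ===== VERDICT (by name: the statement is the Claim_ definition above) =====
theorem farmer_fencing_spec : Claim_equal_farmer_fencing := by
  intro points _
  unfold Spec_farmer_fencing
  rw [ffA_value, ffB_value]
  by_cases h : points.length < 4
  · rw [if_pos h, if_pos h]
  · rw [if_neg h, if_neg h,
      ffmin_congr (fun a => (mem_ffCandsA).trans (mem_ffCandsB).symm)]
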